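-- pv_equiv track=rewrite | github.com/NandhaKumarSR/Python | ProblemSolving/transform_array.py | transformArray
-- ===== SOURCE A (Python) =====
-- from typing import List
--
-- def transformArray(nums: List[int]) -> List[int]:
--         count = 0
--         for i in range(len(nums)):
--             if nums[i] % 2 == 0:
--                 nums[i] = 0
--             else:
--                 nums[i] = 1
--                 count += 1
--         for i in range(len(nums)-count):
--             nums[i] = 0
--         for i in range(len(nums)-count,len(nums)):
--             nums[i] = 1
--         return nums
-- ===== SOURCE B (Python) =====
-- from typing import List
--
-- def transformArray(nums: List[int]) -> List[int]:
--     for i in range(len(nums)):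
--         nums[i] = nums[i] % 2
--     nums.sort()
--     return nums
-- ===== Notes on version B (the rewrite author's own statement) =====
-- stated objective: idiomatic
-- what changed: Replaces A's count-the-odds-then-overwrite-two-slices counting partition with mapping each element to its parity bit followed by an in-place sort; B keeps no count variable and mutates the same list object.
import Mathlib
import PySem

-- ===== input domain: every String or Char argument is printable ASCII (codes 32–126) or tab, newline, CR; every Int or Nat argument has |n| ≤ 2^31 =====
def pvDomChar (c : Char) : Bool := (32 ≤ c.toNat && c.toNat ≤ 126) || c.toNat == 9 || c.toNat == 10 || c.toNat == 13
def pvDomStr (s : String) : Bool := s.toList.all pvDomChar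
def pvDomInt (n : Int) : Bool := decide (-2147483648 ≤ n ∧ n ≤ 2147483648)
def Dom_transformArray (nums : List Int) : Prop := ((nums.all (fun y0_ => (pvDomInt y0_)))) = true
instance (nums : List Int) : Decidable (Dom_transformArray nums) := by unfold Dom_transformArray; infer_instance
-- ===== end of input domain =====

-- B maps each element to its parity bit and sorts, instead of A's counting partition
-- (count odds, then overwrite a zero-slice and a one-slice); equivalence is about the
-- returned list (both Pythons mutate the argument list in place to that same final value).

-- ===== PORT A =====
def transformArray (nums : List Int) : List Int :=
  -- first loop: set each slot to its parity, counting the odd ones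
  let st := (PySem.List.pyRange 0 (PySem.List.len nums) 1).foldl
    (fun (st : List Int × Int) i =>
      if PySem.Int.mod (PySem.List.pyGetD st.1 i 0) 2 = 0 then
        (PySem.List.pySetD st.1 i 0, st.2)
      else
        (PySem.List.pySetD st.1 i 1, st.2 + 1)) (nums, 0)
  let ns := st.1
  let count := st.2
  -- second loop: zero out the first len-count slots
  let ns2 := (PySem.List.pyRange 0 (PySem.List.len ns - count) 1).foldl
    (fun a i => PySem.List.pySetD a i 0) ns
  -- third loop: set the last count slots to one
  let ns3 := (PySem.List.pyRange (PySem.List.len ns2 - count) (PySem.List.len ns2) 1).foldl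
    (fun a i => PySem.List.pySetD a i 1) ns2
  ns3

-- ===== PORT B =====
def transformArray_alt (nums : List Int) : List Int :=
  PySem.List.sorted (nums.map (fun x => PySem.Int.mod x 2)) (fun x => x) false

-- ===== PRECONDITION & SPEC =====
def Spec_transformArray (nums : List Int) (out : List Int) : Prop := out = transformArray_alt nums
instance (nums : List Int) (out : List Int) : Decidable (Spec_transformArray nums out) := by unfold Spec_transformArray; infer_instance

-- ===== CLAIM (what is proved, stated in full; the proofs are below) =====
def Claim_equal_transformArray : Prop := ∀ (nums : List Int), Dom_transformArray nums → Spec_transformArray nums (transformArray nums)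

-- ===== LEMMAS AND PROOFS =====

-- read / write at the boundary between a processed prefix and the untouched suffix
theorem pv_getD_mid (pre suf : List Int) (x d : Int) :
    (pre ++ x :: suf).getD pre.length d = x := by
  simp [List.getD_eq_getElem?_getD]

theorem pv_set_mid (pre suf : List Int) (x v : Int) :
    (pre ++ x :: suf).set pre.length v = pre ++ v :: suf := by
  rw [List.set_append_right _ _ (le_refl _)]
  simp

-- parity is 0 or 1
theorem pv_par_cases (x : Int) : PySem.Int.mod x 2 = 0 ∨ PySem.Int.mod x 2 = 1 := by
  have h1 := PySem.Int.mod_nonneg x (b := 2) (by omega)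
  have h2 := PySem.Int.mod_lt x (b := 2) (by omega)
  omega

-- invariant of A's first loop
theorem pv_loop1 (nums : List Int) (k : Nat) (hk : k ≤ nums.length) :
    (PySem.List.pyRange 0 (k : Int) 1).foldl
      (fun (st : List Int × Int) i =>
        if PySem.Int.mod (PySem.List.pyGetD st.1 i 0) 2 = 0 then
          (PySem.List.pySetD st.1 i 0, st.2)
        else
          (PySem.List.pySetD st.1 i 1, st.2 + 1)) (nums, 0)
    = ((nums.take k).map (fun x => PySem.Int.mod x 2) ++ nums.drop k,
       ((nums.take k).countP (fun x => decide (PySem.Int.mod x 2 ≠ 0)) : Int)) := by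
  induction k with
  | zero => simp [PySem.List.pyRange_one_eq_nil]
  | succ k ih =>
      have hk' : k < nums.length := by omega
      have hcast : ((k + 1 : Nat) : Int) = (k : Int) + 1 := by push_cast; ring
      rw [hcast, PySem.List.pyRange_one_succ_right (by positivity), List.foldl_append,
        ih (by omega)]
      have hlen : ((nums.take k).map (fun x => PySem.Int.mod x 2)).length = k := by
        simp [List.length_take, Nat.min_eq_left (le_of_lt hk')]
      have hdrop : nums.drop k = nums[k] :: nums.drop (k + 1) :=
        List.drop_eq_getElem_cons hk'
      have hget : PySem.List.pyGetD
          ((nums.take k).map (fun x => PySem.Int.mod x 2) ++ nums.drop k) (k : Int) 0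
          = nums[k] := by
        rw [PySem.List.pyGetD_natCast, hdrop]
        have h := pv_getD_mid ((nums.take k).map (fun x => PySem.Int.mod x 2))
          (nums.drop (k + 1)) nums[k] 0
        rw [hlen] at h
        exact h
      have hset : ∀ v : Int, PySem.List.pySetD
          ((nums.take k).map (fun x => PySem.Int.mod x 2) ++ nums.drop k) (k : Int) v
          = (nums.take k).map (fun x => PySem.Int.mod x 2) ++ v :: nums.drop (k + 1) := by
        intro v
        rw [PySem.List.pySetD_natCast, hdrop]
        have h := pv_set_mid ((nums.take k).map (fun x => PySem.Int.mod x 2))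
          (nums.drop (k + 1)) nums[k] v
        rw [hlen] at h
        exact h
      have htake : nums.take (k + 1) = nums.take k ++ [nums[k]] := by
        rw [List.take_add_one]; simp [List.getElem?_eq_getElem hk']
      simp only [List.foldl_cons, List.foldl_nil, hget]
      rcases pv_par_cases nums[k] with hp | hp
      · rw [if_pos hp, hset, htake]
        rw [Prod.mk.injEq]
        constructor
        · rw [List.map_append, List.map_cons, List.map_nil, hp, List.append_assoc,
            List.cons_append, List.nil_append]
        · rw [List.countP_append]
          have h0 : List.countP (fun x => decide (PySem.Int.mod x 2 ≠ 0)) [nums[k]] = 0 := by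
            rw [List.countP_cons, List.countP_nil]
            simp only [hp]
            norm_num
          rw [h0]
          norm_num
      · rw [if_neg (by omega), hset, htake]
        rw [Prod.mk.injEq]
        constructor
        · rw [List.map_append, List.map_cons, List.map_nil, hp, List.append_assoc,
            List.cons_append, List.nil_append]
        · rw [List.countP_append]
          have h1 : List.countP (fun x => decide (PySem.Int.mod x 2 ≠ 0)) [nums[k]] = 1 := by
            rw [List.countP_cons, List.countP_nil]
            simp only [hp]
            norm_num
          rw [h1]
          push_cast
          ring
  
-- a fill loop: set positions a ≤ i < b to v
theorem pv_fill (v : Int) (a b : Nat) (hab : a ≤ b) :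
    ∀ (xs : List Int), b ≤ xs.length →
    (PySem.List.pyRange (a : Int) (b : Int) 1).foldl
      (fun l i => PySem.List.pySetD l i v) xs
    = xs.take a ++ List.replicate (b - a) v ++ xs.drop b := by
  induction b with
  | zero =>
      intro xs hb
      have ha : a = 0 := by omega
      subst ha
      simp [PySem.List.pyRange_one_eq_nil]
  | succ b ih =>
      intro xs hb
      by_cases hab' : a = b + 1
      · subst hab'
        simp [PySem.List.pyRange_one_eq_nil, List.take_append_drop]
      · have hab2 : a ≤ b := by omega
        have hb' : b < xs.length := by omega
        have hcast : ((b + 1 : Nat) : Int) = (b : Int) + 1 := by push_cast; ring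
        rw [hcast, PySem.List.pyRange_one_succ_right (by exact_mod_cast hab2),
          List.foldl_append, ih hab2 xs (by omega)]
        simp only [List.foldl_cons, List.foldl_nil]
        rw [PySem.List.pySetD_natCast]
        have hdrop : xs.drop b = xs[b] :: xs.drop (b + 1) := List.drop_eq_getElem_cons hb'
        have hlen : (xs.take a ++ List.replicate (b - a) v).length = b := by
          simp [List.length_take]; omega
        rw [hdrop]
        have h := pv_set_mid (xs.take a ++ List.replicate (b - a) v)
          (xs.drop (b + 1)) xs[b] v
        rw [hlen] at h
        rw [h]
        rw [show b + 1 - a = (b - a) + 1 from by omega, List.replicate_succ']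
        simp [List.append_assoc]

-- elements of {0,1} permute to zeros-then-ones, counted
theorem pv_perm01 (l : List Int) (h : ∀ x ∈ l, x = 0 ∨ x = 1) :
    (List.replicate (l.countP (fun x => decide (x = 0))) (0 : Int)
      ++ List.replicate (l.countP (fun x => decide (x = 1))) (1 : Int)).Perm l := by
  induction l with
  | nil => simp
  | cons x t ih =>
      have ht : ∀ y ∈ t, y = 0 ∨ y = 1 := fun y hy => h y (List.mem_cons_of_mem _ hy)
      rcases h x (List.mem_cons_self) with hx | hx
      · subst hx
        simp only [List.countP_cons, decide_true]
        norm_num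
        rw [List.replicate_succ]
        exact ((ih ht).cons 0)
      · subst hx
        simp only [List.countP_cons]
        norm_num
        rw [List.replicate_succ]
        exact List.Perm.trans List.perm_middle ((ih ht).cons 1)

theorem pv_count01 (l : List Int) (h : ∀ x ∈ l, x = 0 ∨ x = 1) :
    l.countP (fun x => decide (x = 0)) = l.length - l.countP (fun x => decide (x = 1)) := by
  induction l with
  | nil => simp
  | cons x t ih =>
      have ht : ∀ y ∈ t, y = 0 ∨ y = 1 := fun y hy => h y (List.mem_cons_of_mem _ hy)
      have hle : t.countP (fun x => decide (x = 1)) ≤ t.length := List.countP_le_length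
      rcases h x (List.mem_cons_self) with hx | hx <;> subst hx <;>
        first
          | (simp [ih ht]; omega)
          | simp [ih ht]

-- B's sorted equals zeros-then-ones
theorem pv_b_closed (nums : List Int) :
    transformArray_alt nums
    = List.replicate ((nums.map (fun x => PySem.Int.mod x 2)).countP (fun x => decide (x = 0))) 0
      ++ List.replicate ((nums.map (fun x => PySem.Int.mod x 2)).countP (fun x => decide (x = 1))) 1 := by
  unfold transformArray_alt
  have h01 : ∀ x ∈ nums.map (fun x => PySem.Int.mod x 2), x = 0 ∨ x = 1 := by
    intro x hx
    rcases List.mem_map.mp hx with ⟨y, _, rfl⟩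
    exact pv_par_cases y
  apply PySem.List.sorted_id_eq_of_perm_of_pairwise
  · exact pv_perm01 _ h01
  · refine List.pairwise_append.mpr ⟨?_, ?_, ?_⟩
    · exact (List.pairwise_replicate).mpr (Or.inr le_rfl)
    · exact (List.pairwise_replicate).mpr (Or.inr le_rfl)
    · intro a ha b hb
      rw [List.eq_of_mem_replicate ha, List.eq_of_mem_replicate hb]
      omega

-- ===== VERDICT (by name: the statement is the Claim_ definition above) =====
theorem transformArray_spec : Claim_equal_transformArray := by
  unfold Claim_equal_transformArray
  intro nums _
  unfold Spec_transformArray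
  dsimp only [transformArray]
  have hcle : nums.countP (fun x => decide (PySem.Int.mod x 2 ≠ 0)) ≤ nums.length :=
    List.countP_le_length
  have hlen1 : PySem.List.len nums = ((nums.length : Nat) : Int) := PySem.List.len_eq nums
  rw [hlen1, pv_loop1 nums nums.length (le_refl _)]
  rw [List.take_length, List.drop_length, List.append_nil]
  -- second loop
  have hlenmap : (nums.map (fun x => PySem.Int.mod x 2)).length = nums.length := by
    simp
  have hm : PySem.List.len (nums.map (fun x => PySem.Int.mod x 2))
      - ((nums.countP (fun x => decide (PySem.Int.mod x 2 ≠ 0)) : Nat) : Int)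
      = ((nums.length - nums.countP (fun x => decide (PySem.Int.mod x 2 ≠ 0)) : Nat) : Int) := by
    rw [PySem.List.len_eq, hlenmap]
    omega
  rw [hm]
  dsimp only
  have h2 := pv_fill 0 0 (nums.length - nums.countP (fun x => decide (PySem.Int.mod x 2 ≠ 0)))
    (Nat.zero_le _) (nums.map (fun x => PySem.Int.mod x 2)) (by omega)
  simp only [Nat.cast_zero] at h2
  rw [h2]
  rw [List.take_zero, List.nil_append, Nat.sub_zero]
  -- third loop
  have hyslen : (List.replicate (nums.length - nums.countP (fun x => decide (PySem.Int.mod x 2 ≠ 0))) (0 : Int)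
      ++ (nums.map (fun x => PySem.Int.mod x 2)).drop
        (nums.length - nums.countP (fun x => decide (PySem.Int.mod x 2 ≠ 0)))).length
      = nums.length := by
    simp
  have hm2 : PySem.List.len (List.replicate (nums.length - nums.countP (fun x => decide (PySem.Int.mod x 2 ≠ 0))) (0 : Int)
      ++ (nums.map (fun x => PySem.Int.mod x 2)).drop
        (nums.length - nums.countP (fun x => decide (PySem.Int.mod x 2 ≠ 0))))
      - ((nums.countP (fun x => decide (PySem.Int.mod x 2 ≠ 0)) : Nat) : Int)
      = ((nums.length - nums.countP (fun x => decide (PySem.Int.mod x 2 ≠ 0)) : Nat) : Int) := by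
    rw [PySem.List.len_eq, hyslen]
    omega
  have hm3 : PySem.List.len (List.replicate (nums.length - nums.countP (fun x => decide (PySem.Int.mod x 2 ≠ 0))) (0 : Int)
      ++ (nums.map (fun x => PySem.Int.mod x 2)).drop
        (nums.length - nums.countP (fun x => decide (PySem.Int.mod x 2 ≠ 0))))
      = ((nums.length : Nat) : Int) := by
    rw [PySem.List.len_eq, hyslen]
  rw [hm2, hm3]
  rw [pv_fill 1 (nums.length - nums.countP (fun x => decide (PySem.Int.mod x 2 ≠ 0))) nums.length
    (by omega) _ (by omega)]
  rw [List.take_append_of_le_length (by simp), List.take_replicate,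
    min_self, List.drop_eq_nil_of_le (by rw [hyslen]), List.append_nil]
  -- compare with B's closed form
  rw [pv_b_closed nums]
  have h01 : ∀ x ∈ nums.map (fun x => PySem.Int.mod x 2), x = 0 ∨ x = 1 := by
    intro x hx
    rcases List.mem_map.mp hx with ⟨y, _, rfl⟩
    exact pv_par_cases y
  have hc1 : (nums.map (fun x => PySem.Int.mod x 2)).countP (fun x => decide (x = 1))
      = nums.countP (fun x => decide (PySem.Int.mod x 2 ≠ 0)) := by
    rw [List.countP_map]
    apply List.countP_congr
    intro x _
    rcases pv_par_cases x with hp | hp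
    · simp [hp]
    · simp [hp]
  have hc0 : (nums.map (fun x => PySem.Int.mod x 2)).countP (fun x => decide (x = 0))
      = nums.length - nums.countP (fun x => decide (PySem.Int.mod x 2 ≠ 0)) := by
    rw [pv_count01 _ h01, hlenmap, hc1]
  rw [hc0, hc1, Nat.sub_sub_self hcle]
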